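-- pv_equiv track=rewrite | github.com/mxnkiSpace/inf_404_tarea_2 | complete_encode.py | relation_cr_chr
-- ===== SOURCE A (Python) =====
-- def relation_cr_chr(cr, chr_vars, courses, rooms, total_hours):
--     """Relación cr ↔ chr (Sección 4.4)"""
--     clauses = []
--     all_room_ids = list(rooms.keys())
--
--     for c in courses:
--         for r in all_room_ids:
--             if (c, r) not in cr:
--                 continue
--
--             for h in range(total_hours):
--                 if (c, h, r) in chr_vars:
--                     clauses.append([-chr_vars[(c, h, r)], cr[(c, r)]])
--
--             clause = [-cr[(c, r)]]
--             for h in range(total_hours):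
--                 if (c, h, r) in chr_vars:
--                     clause.append(chr_vars[(c, h, r)])
--             clauses.append(clause)
--
--     return clauses
-- ===== SOURCE B (Python) =====
-- def relation_cr_chr(cr, chr_vars, courses, rooms, total_hours):
--     """Relación cr ↔ chr (Sección 4.4) — single pass over chr_vars grouped by (c, r)."""
--     entries = [((c, r), (h, v)) for (c, h, r), v in chr_vars.items() if 0 <= h < total_hours]
--     groups = {}
--     for key, pair in entries:
--         groups.setdefault(key, []).append(pair)
--     clauses = []
--     for c in courses:
--         for r in rooms:
--             if (c, r) not in cr:
--                 continue
--             w = cr[(c, r)]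
--             pairs = sorted(groups.get((c, r), []), key=lambda p: p[0])
--             for _, v in pairs:
--                 clauses.append([-v, w])
--             clauses.append([-w] + [v for _, v in pairs])
--     return clauses
-- ===== Notes on version B (the rewrite author's own statement) =====
-- stated objective: alternative
-- what changed: B replaces A's per-(c,r) rescans of every hour in range(total_hours) by a single pass over chr_vars that groups its entries into a dict keyed by (c,r), sorted by hour to keep A's emission order.
import Mathlib
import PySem

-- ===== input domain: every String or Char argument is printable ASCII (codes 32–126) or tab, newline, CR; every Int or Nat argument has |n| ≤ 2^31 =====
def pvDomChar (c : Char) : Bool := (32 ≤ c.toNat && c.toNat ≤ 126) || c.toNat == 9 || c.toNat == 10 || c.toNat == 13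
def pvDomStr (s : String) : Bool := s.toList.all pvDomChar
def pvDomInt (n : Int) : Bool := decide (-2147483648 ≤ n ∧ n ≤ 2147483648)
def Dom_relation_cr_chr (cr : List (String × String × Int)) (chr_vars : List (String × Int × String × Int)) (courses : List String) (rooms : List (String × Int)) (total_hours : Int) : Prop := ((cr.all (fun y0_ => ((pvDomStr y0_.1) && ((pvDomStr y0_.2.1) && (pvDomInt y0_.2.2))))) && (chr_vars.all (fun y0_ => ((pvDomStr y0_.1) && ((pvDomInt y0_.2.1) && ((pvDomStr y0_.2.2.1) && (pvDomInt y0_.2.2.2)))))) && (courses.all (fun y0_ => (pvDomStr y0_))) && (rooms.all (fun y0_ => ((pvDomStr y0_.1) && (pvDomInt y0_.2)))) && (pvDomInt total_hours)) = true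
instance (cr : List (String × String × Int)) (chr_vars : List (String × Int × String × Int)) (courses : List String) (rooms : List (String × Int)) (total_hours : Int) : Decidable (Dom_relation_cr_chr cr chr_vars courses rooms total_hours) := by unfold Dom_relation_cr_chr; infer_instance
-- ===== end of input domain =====

-- B groups chr_vars by (c, r) in one pass (sorted by hour to keep A's emission order)
-- instead of A's per-(c, r) rescans of every hour in range(total_hours); equivalence is
-- proved on association lists with distinct chr_vars keys (the Python-dict invariant).

-- ===== PORT A =====
-- dict lookup cr[(c, r)] / '(c, r) in cr' (first match in the association list)
def crGet (cr : List (String × String × Int)) (c r : String) : Option Int :=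
  (cr.find? (fun e => e.1 == c && e.2.1 == r)).map (·.2.2)

-- dict lookup chr_vars[(c, h, r)] / '(c, h, r) in chr_vars'
def chrGet (chr_vars : List (String × Int × String × Int)) (c : String) (h : Int) (r : String) : Option Int :=
  (chr_vars.find? (fun e => e.1 == c && e.2.1 == h && e.2.2.1 == r)).map (·.2.2.2)

def relation_cr_chr (cr : List (String × String × Int)) (chr_vars : List (String × Int × String × Int)) (courses : List String) (rooms : List (String × Int)) (total_hours : Int) : List (List Int) :=
  let all_room_ids := rooms.map (·.1)
  courses.foldl (fun clauses c =>
    all_room_ids.foldl (fun clauses r =>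
      match crGet cr c r with
      | none => clauses
      | some w =>
        let clauses := (PySem.List.pyRange 0 total_hours 1).foldl (fun cls h =>
          match chrGet chr_vars c h r with
          | none => cls
          | some v => cls ++ [[-v, w]]) clauses
        let clause := (PySem.List.pyRange 0 total_hours 1).foldl (fun cl h =>
          match chrGet chr_vars c h r with
          | none => cl
          | some v => cl ++ [v]) [-w]
        clauses ++ [clause]) clauses) []

-- ===== PORT B =====
def relation_cr_chr_alt (cr : List (String × String × Int)) (chr_vars : List (String × Int × String × Int)) (courses : List String) (rooms : List (String × Int)) (total_hours : Int) : List (List Int) :=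
  -- entries = [((c, r), (h, v)) for (c, h, r), v in chr_vars.items() if 0 <= h < total_hours]
  let entries := chr_vars.filterMap (fun e =>
    if 0 ≤ e.2.1 ∧ e.2.1 < total_hours then some ((e.1, e.2.2.1), (e.2.1, e.2.2.2)) else none)
  -- groups.setdefault(key, []).append(pair)
  let groups := entries.foldl (fun d p => d.modify p.1 ([] : List (Int × Int)) (· ++ [p.2])) PySem.Dict.empty
  courses.foldl (fun clauses c =>
    rooms.foldl (fun clauses rm =>
      match crGet cr c rm.1 with
      | none => clauses
      | some w =>
        let pairs := PySem.List.sorted (groups.getD (c, rm.1) []) (fun p => p.1) false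
        (clauses ++ pairs.map (fun p => [-p.2, w])) ++ [(-w) :: pairs.map (·.2)]) clauses) []

-- ===== PRECONDITION & SPEC =====
-- Pre_ excludes association lists in which chr_vars has a repeated (c, h, r) key: a Python
-- dict cannot contain duplicate keys, so no Python input reaches such a list.
def Pre_relation_cr_chr (cr : List (String × String × Int)) (chr_vars : List (String × Int × String × Int)) (courses : List String) (rooms : List (String × Int)) (total_hours : Int) : Prop :=
  (chr_vars.map (fun e => (e.1, e.2.1, e.2.2.1))).Nodup
instance (cr : List (String × String × Int)) (chr_vars : List (String × Int × String × Int)) (courses : List String) (rooms : List (String × Int)) (total_hours : Int) : Decidable (Pre_relation_cr_chr cr chr_vars courses rooms total_hours) := by unfold Pre_relation_cr_chr; infer_instance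

def pvWitness_relation_cr_chr : (List (String × String × Int)) × (List (String × Int × String × Int)) × List String × (List (String × Int)) × Int :=
  ([("a", "x", 1), ("b", "x", 2)], [("a", 1, "x", 10), ("a", 0, "x", 11)], ["a", "b"], [("x", 7)], 2)

def Spec_relation_cr_chr (cr : List (String × String × Int)) (chr_vars : List (String × Int × String × Int)) (courses : List String) (rooms : List (String × Int)) (total_hours : Int) (out : List (List Int)) : Prop := out = relation_cr_chr_alt cr chr_vars courses rooms total_hours
instance (cr : List (String × String × Int)) (chr_vars : List (String × Int × String × Int)) (courses : List String) (rooms : List (String × Int)) (total_hours : Int) (out : List (List Int)) : Decidable (Spec_relation_cr_chr cr chr_vars courses rooms total_hours out) := by unfold Spec_relation_cr_chr; infer_instance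

-- ===== CLAIM (what is proved, stated in full; the proofs are below) =====
def Claim_equal_relation_cr_chr : Prop := ∀ (cr : List (String × String × Int)) (chr_vars : List (String × Int × String × Int)) (courses : List String) (rooms : List (String × Int)) (total_hours : Int), Dom_relation_cr_chr cr chr_vars courses rooms total_hours → Pre_relation_cr_chr cr chr_vars courses rooms total_hours → Spec_relation_cr_chr cr chr_vars courses rooms total_hours (relation_cr_chr cr chr_vars courses rooms total_hours)

-- ===== LEMMAS AND PROOFS =====

-- A's inner loops, as init ++ map over a filterMap
theorem foldl_opt {β : Type} (l : List Int) (g : Int → Option Int) (f : Int × Int → β) (acc : List β) :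
    l.foldl (fun a h => match g h with | none => a | some v => a ++ [f (h, v)]) acc
      = acc ++ (l.filterMap (fun h => (g h).map (fun v => (h, v)))).map f := by
  induction l generalizing acc with
  | nil => simp
  | cons x t ih =>
    cases hx : g x with
    | none => simp [List.foldl_cons, hx, ih]
    | some v => simp [List.foldl_cons, hx, ih]

-- the hour-ordered list A effectively iterates for a fixed (c, r)
def rangeList (chr_vars : List (String × Int × String × Int)) (c r : String) (T : Int) : List (Int × Int) :=
  (PySem.List.pyRange 0 T 1).filterMap (fun h => (chrGet chr_vars c h r).map (fun v => (h, v)))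

-- the chr_vars-ordered list B's group for (c, r) holds
def groupList (chr_vars : List (String × Int × String × Int)) (c r : String) (T : Int) : List (Int × Int) :=
  chr_vars.filterMap (fun e =>
    if e.1 = c ∧ e.2.2.1 = r ∧ 0 ≤ e.2.1 ∧ e.2.1 < T then some (e.2.1, e.2.2.2) else none)

theorem filterMap_or_perm {α β : Type} (l : List α) (p q : α → Prop) [DecidablePred p] [DecidablePred q]
    (f : α → β) (hdisj : ∀ a, ¬ (p a ∧ q a)) :
    (l.filterMap (fun a => if p a ∨ q a then some (f a) else none)).Perm
      (l.filterMap (fun a => if p a then some (f a) else none)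
        ++ l.filterMap (fun a => if q a then some (f a) else none)) := by
  induction l with
  | nil => simp
  | cons x t ih =>
    by_cases hp : p x
    · have hq : ¬ q x := fun h => hdisj x ⟨hp, h⟩
      simpa [hp, hq] using ih.cons (f x)
    · by_cases hq : q x
      · simp only [List.filterMap_cons, hp, hq, or_true, if_true]
        exact (ih.cons (f x)).trans (List.perm_middle).symm
      · simpa [hp, hq] using ih

theorem single_key_filterMap (chr_vars : List (String × Int × String × Int)) (c r : String) (h : Int)
    (hnd : (chr_vars.map (fun e => (e.1, e.2.1, e.2.2.1))).Nodup) :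
    chr_vars.filterMap (fun e => if e.1 = c ∧ e.2.1 = h ∧ e.2.2.1 = r then some (e.2.1, e.2.2.2) else none)
      = ((chrGet chr_vars c h r).map (fun v => (h, v))).toList := by
  induction chr_vars with
  | nil => simp [chrGet]
  | cons x t ih =>
    simp only [List.map_cons, List.nodup_cons] at hnd
    by_cases hx : x.1 = c ∧ x.2.1 = h ∧ x.2.2.1 = r
    · have htail : t.filterMap (fun e => if e.1 = c ∧ e.2.1 = h ∧ e.2.2.1 = r then some (e.2.1, e.2.2.2) else none) = [] := by
        rw [List.filterMap_eq_nil_iff]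
        intro e he
        split_ifs with hcond
        · exfalso
          apply hnd.1
          have hmem : (e.1, e.2.1, e.2.2.1) ∈ t.map (fun e => (e.1, e.2.1, e.2.2.1)) :=
            List.mem_map_of_mem he
          rw [hcond.1, hcond.2.1, hcond.2.2] at hmem
          rw [hx.1, hx.2.1, hx.2.2]
          exact hmem
        · rfl
      have hfind : (x.1 == c && x.2.1 == h && x.2.2.1 == r) = true := by
        simp [hx.1, hx.2.1, hx.2.2]
      simp [hx, htail, chrGet, hfind]
    · have hfind : (x.1 == c && x.2.1 == h && x.2.2.1 == r) = false := by
        rcases (by tauto : ¬ x.1 = c ∨ ¬ x.2.1 = h ∨ ¬ x.2.2.1 = r) with h1 | h1 | h1 <;> simp [h1]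
      have hchr : chrGet (x :: t) c h r = chrGet t c h r := by
        simp [chrGet, hfind]
      simp only [List.filterMap_cons, if_neg hx]
      rw [hchr]
      exact ih hnd.2

theorem groupList_perm_rangeList (chr_vars : List (String × Int × String × Int)) (c r : String) (n : Nat)
    (hnd : (chr_vars.map (fun e => (e.1, e.2.1, e.2.2.1))).Nodup) :
    (rangeList chr_vars c r (n : Int)).Perm (groupList chr_vars c r (n : Int)) := by
  induction n with
  | zero =>
    rw [Nat.cast_zero]
    have hg : groupList chr_vars c r 0 = [] := by
      rw [groupList, List.filterMap_eq_nil_iff]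
      intro e _
      split_ifs with hcond
      · omega
      · rfl
    simp [rangeList, hg, PySem.List.pyRange]
  | succ m ih =>
    have hcast : ((m + 1 : Nat) : Int) = ((m : Nat) : Int) + 1 := by push_cast; ring
    have hrange : PySem.List.pyRange 0 ((m + 1 : Nat) : Int) 1
        = PySem.List.pyRange 0 ((m : Nat) : Int) 1 ++ [((m : Nat) : Int)] := by
      rw [hcast]
      exact PySem.List.pyRange_one_succ_right (by positivity)
    have hL : rangeList chr_vars c r ((m + 1 : Nat) : Int)
        = rangeList chr_vars c r ((m : Nat) : Int)
          ++ ((chrGet chr_vars c ((m : Nat) : Int) r).map (fun v => (((m : Nat) : Int), v))).toList := by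
      rw [rangeList, hrange, List.filterMap_append, rangeList]
      congr 1
    have hsplit : groupList chr_vars c r ((m + 1 : Nat) : Int)
        = chr_vars.filterMap (fun e =>
            if (e.1 = c ∧ e.2.2.1 = r ∧ 0 ≤ e.2.1 ∧ e.2.1 < ((m : Nat) : Int)) ∨
               (e.1 = c ∧ e.2.1 = ((m : Nat) : Int) ∧ e.2.2.1 = r)
            then some (e.2.1, e.2.2.2) else none) := by
      rw [groupList]
      apply List.filterMap_congr
      intro e _
      have hiff : (e.1 = c ∧ e.2.2.1 = r ∧ 0 ≤ e.2.1 ∧ e.2.1 < ((m + 1 : Nat) : Int)) ↔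
          ((e.1 = c ∧ e.2.2.1 = r ∧ 0 ≤ e.2.1 ∧ e.2.1 < ((m : Nat) : Int)) ∨
           (e.1 = c ∧ e.2.1 = ((m : Nat) : Int) ∧ e.2.2.1 = r)) := by
        rw [hcast]
        constructor
        · rintro ⟨h1, h2, h3, h4⟩
          by_cases hm : e.2.1 = ((m : Nat) : Int)
          · exact Or.inr ⟨h1, hm, h2⟩
          · exact Or.inl ⟨h1, h2, h3, by omega⟩
        · rintro (⟨h1, h2, h3, h4⟩ | ⟨h1, h2, h3⟩)
          · exact ⟨h1, h2, h3, by omega⟩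
          · exact ⟨h1, h3, by omega, by omega⟩
      split_ifs with h1 h2 h2 <;>
        first | rfl | exact absurd (hiff.mp h1) h2 | exact absurd (hiff.mpr h2) h1
    have hperm := filterMap_or_perm chr_vars
      (fun e => e.1 = c ∧ e.2.2.1 = r ∧ 0 ≤ e.2.1 ∧ e.2.1 < ((m : Nat) : Int))
      (fun e => e.1 = c ∧ e.2.1 = ((m : Nat) : Int) ∧ e.2.2.1 = r)
      (fun e => (e.2.1, e.2.2.2))
      (by rintro e ⟨⟨_, _, _, h4⟩, ⟨_, h5, _⟩⟩; omega)
    rw [hL, hsplit]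
    refine List.Perm.trans (List.Perm.append ih ?_) hperm.symm
    rw [single_key_filterMap chr_vars c r ((m : Nat) : Int) hnd]

theorem rangeList_pairwise (chr_vars : List (String × Int × String × Int)) (c r : String) (T : Int) :
    (rangeList chr_vars c r T).Pairwise (fun a b => a.1 < b.1) := by
  rw [rangeList, List.pairwise_filterMap]
  refine (PySem.List.pairwise_lt_pyRange_one 0 T).imp_of_mem ?_
  intro h h' _ _ hlt
  intro a ha b hb
  cases hg : chrGet chr_vars c h r <;> rw [hg] at ha
  · exact absurd ha (by simp)
  · cases hg' : chrGet chr_vars c h' r <;> rw [hg'] at hb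
    · exact absurd hb (by simp)
    · have ha' : a.1 = h := by cases ha; rfl
      have hb' : b.1 = h' := by cases hb; rfl
      rw [ha', hb']
      exact hlt

-- B's group for (c, r) is exactly groupList
theorem getD_groups (chr_vars : List (String × Int × String × Int)) (c r : String) (T : Int) :
    ((chr_vars.filterMap (fun e =>
        if 0 ≤ e.2.1 ∧ e.2.1 < T then some ((e.1, e.2.2.1), (e.2.1, e.2.2.2)) else none)).foldl
      (fun d p => d.modify p.1 ([] : List (Int × Int)) (· ++ [p.2])) PySem.Dict.empty).getD (c, r) []
      = groupList chr_vars c r T := by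
  rw [PySem.Dict.getD_foldl_modify_append, PySem.Dict.getD_empty]
  rw [List.filter_filterMap, List.map_filterMap, groupList]
  simp only [List.nil_append]
  apply List.filterMap_congr
  intro e _
  by_cases h1 : 0 ≤ e.2.1 ∧ e.2.1 < T
  · by_cases h2 : e.1 = c ∧ e.2.2.1 = r
    · simp [h1, h2.1, h2.2, Option.filter]
    · have : ((e.1, e.2.2.1) == (c, r)) = false := by
        rcases (by tauto : ¬ e.1 = c ∨ ¬ e.2.2.1 = r) with h | h <;> simp [h]
      rw [if_pos h1, if_neg (show ¬ (e.1 = c ∧ e.2.2.1 = r ∧ 0 ≤ e.2.1 ∧ e.2.1 < T) by tauto)]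
      simp [Option.filter, this]
  · rw [if_neg h1, if_neg (show ¬ (e.1 = c ∧ e.2.2.1 = r ∧ 0 ≤ e.2.1 ∧ e.2.1 < T) by tauto)]
    rfl

theorem sorted_groups_eq_rangeList (chr_vars : List (String × Int × String × Int)) (c r : String) (T : Int)
    (hnd : (chr_vars.map (fun e => (e.1, e.2.1, e.2.2.1))).Nodup) :
    PySem.List.sorted (groupList chr_vars c r T) (fun p => p.1) false = rangeList chr_vars c r T := by
  rcases (by omega : T ≤ 0 ∨ 0 < T) with hT | hT
  · have h1 : groupList chr_vars c r T = [] := by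
      rw [groupList, List.filterMap_eq_nil_iff]
      intro e _
      split_ifs with hcond
      · omega
      · rfl
    have h2 : rangeList chr_vars c r T = [] := by
      simp [rangeList, PySem.List.pyRange, show ¬ (0 : Int) < T by omega]
    simp [h1, h2, PySem.List.sorted]
  · obtain ⟨n, rfl⟩ : ∃ n : Nat, T = (n : Int) := ⟨T.toNat, by omega⟩
    exact PySem.List.sorted_eq_of_perm_of_pairwise_lt _ _ _
      (groupList_perm_rangeList chr_vars c r n hnd)
      (rangeList_pairwise chr_vars c r (n : Int))

-- ===== VERDICT (by name: the statement is the Claim_ definition above) =====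
theorem relation_cr_chr_spec : Claim_equal_relation_cr_chr := by
  intro cr chr_vars courses rooms total_hours _ hpre
  unfold Spec_relation_cr_chr
  simp only [relation_cr_chr, relation_cr_chr_alt, List.foldl_map]
  apply PySem.List.foldl_congr_mem
  intro clauses c _
  apply PySem.List.foldl_congr_mem
  intro cls rm _
  cases hcr : crGet cr c rm.1 with
  | none => rfl
  | some w =>
    simp only
    rw [foldl_opt (PySem.List.pyRange 0 total_hours 1) (fun h => chrGet chr_vars c h rm.1)
        (fun p => [-p.2, w]) cls,
      foldl_opt (PySem.List.pyRange 0 total_hours 1) (fun h => chrGet chr_vars c h rm.1)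
        (fun p => p.2) [-w],
      getD_groups chr_vars c rm.1 total_hours,
      sorted_groups_eq_rangeList chr_vars c rm.1 total_hours hpre]
    rfl
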